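-- pv_equiv track=rewrite | github.com/drewto/2048_bot | 2048.py | generate_move_order
-- ===== SOURCE A (Python) =====
-- BOARD_DIMENSIONS = {'row': 4, 'col': 4}
--
-- def generate_move_order(direction):
--
-- 	move_order = []
--
-- 	if direction == 'up':
-- 		# move top down
-- 		for row in range(BOARD_DIMENSIONS['row']):
-- 			for col in range(BOARD_DIMENSIONS['col']):
-- 				move_order.append([row, col])
--
--
-- 	if direction == 'down':
-- 		# move buttom up
-- 		for row in range(BOARD_DIMENSIONS['row'] - 1, -1, -1):
-- 			for col in range(0, BOARD_DIMENSIONS['col']):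
-- 				move_order.append([row, col])
--
-- 	if direction == 'left':
-- 		# move left to right
-- 		for col in range(BOARD_DIMENSIONS['col']):
-- 			for row in range(BOARD_DIMENSIONS['row']):
-- 				move_order.append([row, col])
--
-- 	if direction == 'right':
-- 		# move right to left
-- 		for col in range(BOARD_DIMENSIONS['col'] - 1, -1, -1):
-- 			for row in range(BOARD_DIMENSIONS['row']):
-- 				move_order.append([row, col])
-- 	return move_order
-- ===== SOURCE B (Python) =====
-- def generate_move_order(direction):
--     base = [[r, c] for r in range(4) for c in range(4)]
--     keys = {
--         'up':    lambda cell: cell[0] * 4 + cell[1],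
--         'down':  lambda cell: (3 - cell[0]) * 4 + cell[1],
--         'left':  lambda cell: cell[1] * 4 + cell[0],
--         'right': lambda cell: (3 - cell[1]) * 4 + cell[0],
--     }
--     keyfunc = keys.get(direction)
--     if keyfunc is None:
--         return []
--     return sorted(base, key=keyfunc)
-- ===== Notes on version B (the rewrite author's own statement) =====
-- stated objective: simpler
-- what changed: Replaces four branch-specific nested loop blocks by one row-major enumeration of the 4x4 cells plus a single stable sort keyed by a per-direction key table; unknown directions fall out as [] from the dict lookup.
import Mathlib
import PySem

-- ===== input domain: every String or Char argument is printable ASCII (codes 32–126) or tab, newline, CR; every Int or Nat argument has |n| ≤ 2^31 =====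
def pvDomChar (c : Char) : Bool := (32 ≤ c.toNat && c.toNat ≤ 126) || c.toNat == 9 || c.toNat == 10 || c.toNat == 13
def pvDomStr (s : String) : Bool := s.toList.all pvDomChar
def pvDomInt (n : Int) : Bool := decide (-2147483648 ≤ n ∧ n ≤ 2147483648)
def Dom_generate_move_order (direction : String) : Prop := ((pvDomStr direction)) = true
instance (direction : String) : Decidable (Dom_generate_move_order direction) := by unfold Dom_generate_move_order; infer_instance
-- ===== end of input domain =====

-- B replaces four branch-specific nested loops by one row-major cell enumeration
-- plus a single stable sort keyed per direction (objective: simpler).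

-- ===== PORT A =====
def generate_move_order (direction : String) : List (List Int) :=
  let move_order : List (List Int) := []
  let move_order :=
    if direction == "up" then
      (PySem.List.pyRange 0 4 1).foldl (fun acc row =>
        (PySem.List.pyRange 0 4 1).foldl (fun acc col => acc ++ [[row, col]]) acc) move_order
    else move_order
  let move_order :=
    if direction == "down" then
      (PySem.List.pyRange 3 (-1) (-1)).foldl (fun acc row =>
        (PySem.List.pyRange 0 4 1).foldl (fun acc col => acc ++ [[row, col]]) acc) move_order
    else move_order
  let move_order :=
    if direction == "left" then
      (PySem.List.pyRange 0 4 1).foldl (fun acc col =>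
        (PySem.List.pyRange 0 4 1).foldl (fun acc row => acc ++ [[row, col]]) acc) move_order
    else move_order
  let move_order :=
    if direction == "right" then
      (PySem.List.pyRange 3 (-1) (-1)).foldl (fun acc col =>
        (PySem.List.pyRange 0 4 1).foldl (fun acc row => acc ++ [[row, col]]) acc) move_order
    else move_order
  move_order

-- ===== PORT B =====
-- cell[0]/cell[1] ported as pyGetD with default 0: every cell of base is [r, c] (length 2),
-- so the default is never used and the port is exact on all reachable cells.
def generate_move_order_alt (direction : String) : List (List Int) :=
  let base : List (List Int) :=
    (PySem.List.pyRange 0 4 1).flatMap fun r =>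
      (PySem.List.pyRange 0 4 1).map fun c => [r, c]
  let keys : PySem.Dict String (List Int → Int) :=
    PySem.Dict.ofList
      [("up",    fun cell => PySem.List.pyGetD cell 0 0 * 4 + PySem.List.pyGetD cell 1 0),
       ("down",  fun cell => (3 - PySem.List.pyGetD cell 0 0) * 4 + PySem.List.pyGetD cell 1 0),
       ("left",  fun cell => PySem.List.pyGetD cell 1 0 * 4 + PySem.List.pyGetD cell 0 0),
       ("right", fun cell => (3 - PySem.List.pyGetD cell 1 0) * 4 + PySem.List.pyGetD cell 0 0)]
  match PySem.Dict.get? keys direction with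
  | none => []
  | some keyfunc => PySem.List.sorted base keyfunc

-- ===== PRECONDITION & SPEC =====
def Spec_generate_move_order (direction : String) (out : List (List Int)) : Prop := out = generate_move_order_alt direction
instance (direction : String) (out : List (List Int)) : Decidable (Spec_generate_move_order direction out) := by unfold Spec_generate_move_order; infer_instance

-- ===== CLAIM (what is proved, stated in full; the proofs are below) =====
def Claim_equal_generate_move_order : Prop := ∀ (direction : String), Dom_generate_move_order direction → Spec_generate_move_order direction (generate_move_order direction)

-- ===== LEMMAS AND PROOFS =====

-- ===== VERDICT (by name: the statement is the Claim_ definition above) =====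
theorem generate_move_order_spec : Claim_equal_generate_move_order := by
  intro d _
  unfold Spec_generate_move_order
  by_cases h1 : d = "up"
  · subst h1; decide
  by_cases h2 : d = "down"
  · subst h2; decide
  by_cases h3 : d = "left"
  · subst h3; decide
  by_cases h4 : d = "right"
  · subst h4; decide
  have g1 : ("up" : String) ≠ d := fun h => h1 h.symm
  have g2 : ("down" : String) ≠ d := fun h => h2 h.symm
  have g3 : ("left" : String) ≠ d := fun h => h3 h.symm
  have g4 : ("right" : String) ≠ d := fun h => h4 h.symm
  have e1 : (("up" : String) == d) = false := beq_eq_false_iff_ne.mpr g1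
  have e2 : (("down" : String) == d) = false := beq_eq_false_iff_ne.mpr g2
  have e3 : (("left" : String) == d) = false := beq_eq_false_iff_ne.mpr g3
  have e4 : (("right" : String) == d) = false := beq_eq_false_iff_ne.mpr g4
  simp [generate_move_order, generate_move_order_alt, PySem.Dict.get?, PySem.Dict.ofList,
    PySem.Dict.update, PySem.Dict.empty, PySem.Dict.insert,
    List.find?, h1, h2, h3, h4, e1, e2, e3, e4]
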